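-- pv_equiv track=rewrite | github.com/suno7608/d2c-intel | scripts/d2c_report_generator.py | format_data_samples
-- ===== SOURCE A (Python) =====
-- from collections import Counter, defaultdict
-- from typing import Any, Dict, List, Optional, Tuple
--
-- COUNTRY_ORDER = [
--     "US", "CA", "UK", "DE", "FR", "ES", "IT", "BR",
--     "MX", "CL", "TH", "AU", "TW", "SG", "EG", "SA",
-- ]
--
-- COUNTRY_FLAG = {
--     "US": "🇺🇸", "CA": "🇨🇦", "UK": "🇬🇧", "DE": "🇩🇪",
--     "FR": "🇫🇷", "ES": "🇪🇸", "IT": "🇮🇹", "BR": "🇧🇷",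
--     "MX": "🇲🇽", "CL": "🇨🇱", "TH": "🇹🇭", "AU": "🇦🇺",
--     "TW": "🇹🇼", "SG": "🇸🇬", "EG": "🇪🇬", "SA": "🇸🇦",
-- }
--
-- PRODUCT_ORDER = ["TV", "Refrigerator", "Washing Machine", "Monitor", "LG gram"]
--
-- def format_data_samples(records: List[dict], max_per_group: int = 5) -> str:
--     """국가/제품별 대표 데이터 샘플을 포맷합니다."""
--     groups: Dict[Tuple[str, str], List[dict]] = defaultdict(list)
--     for r in records:
--         key = (r.get("country", "?"), r.get("product", "?"))
--         groups[key].append(r)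
--
--     lines = ["## 국가/제품별 주요 데이터 샘플\n"]
--     for country in COUNTRY_ORDER:
--         for product in PRODUCT_ORDER:
--             group = groups.get((country, product), [])
--             if not group:
--                 continue
--             flag = COUNTRY_FLAG.get(country, "")
--             lines.append(f"\n### {flag} {country} - {product} ({len(group)}건)")
--             for r in group[:max_per_group]:
--                 brand = r.get("brand", "?")
--                 signal = r.get("signal_type", "?")
--                 value = r.get("value", "")[:200]
--                 url = r.get("source_url", "")
--                 confidence = r.get("confidence", "?")
--                 lines.append(
--                     f"- [{brand}] ({signal}, {confidence}) {value}"
--                     + (f" [🔗]({url})" if url else "")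
--                 )
--
--     return "\n".join(lines)
-- ===== SOURCE B (Python) =====
-- COUNTRY_ORDER = [
--     "US", "CA", "UK", "DE", "FR", "ES", "IT", "BR",
--     "MX", "CL", "TH", "AU", "TW", "SG", "EG", "SA",
-- ]
--
-- COUNTRY_FLAG = {
--     "US": "\U0001F1FA\U0001F1F8", "CA": "\U0001F1E8\U0001F1E6", "UK": "\U0001F1EC\U0001F1E7", "DE": "\U0001F1E9\U0001F1EA",
--     "FR": "\U0001F1EB\U0001F1F7", "ES": "\U0001F1EA\U0001F1F8", "IT": "\U0001F1EE\U0001F1F9", "BR": "\U0001F1E7\U0001F1F7",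
--     "MX": "\U0001F1F2\U0001F1FD", "CL": "\U0001F1E8\U0001F1F1", "TH": "\U0001F1F9\U0001F1ED", "AU": "\U0001F1E6\U0001F1FA",
--     "TW": "\U0001F1F9\U0001F1FC", "SG": "\U0001F1F8\U0001F1EC", "EG": "\U0001F1EA\U0001F1EC", "SA": "\U0001F1F8\U0001F1E6",
-- }
--
-- PRODUCT_ORDER = ["TV", "Refrigerator", "Washing Machine", "Monitor", "LG gram"]
--
--
-- def _line(r):
--     url = r.get("source_url", "")
--     return ("\n- [" + r.get("brand", "?") + "] (" + r.get("signal_type", "?")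
--             + ", " + r.get("confidence", "?") + ") " + r.get("value", "")[:200]
--             + ((" [\U0001F517](" + url + ")") if url else ""))
--
--
-- def format_data_samples(records, max_per_group=5):
--     """No grouping index and no lines list: walk the flattened combo order,
--     filter the matching records per combo, and grow the report string directly."""
--     out = "## \uad6d\uac00/\uc81c\ud488\ubcc4 \uc8fc\uc694 \ub370\uc774\ud130 \uc0d8\ud50c\n"
--     for country, product in [(c, p) for c in COUNTRY_ORDER for p in PRODUCT_ORDER]:
--         ms = [r for r in records
--               if r.get("country", "?") == country and r.get("product", "?") == product]
--         if not ms: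
--             continue
--         out += ("\n\n### " + COUNTRY_FLAG.get(country, "") + " " + country + " - "
--                 + product + " (" + str(len(ms)) + "\uac74)")
--         out += "".join(_line(r) for r in ms[:max_per_group])
--     return out
-- ===== Notes on version B (the rewrite author's own statement) =====
-- stated objective: alternative
-- what changed: Drops A's defaultdict grouping index and lines-list/'\n'.join assembly: B walks the flattened (country, product) combo list, filters the matching records per combo, and grows the report string by direct concatenation with ''.join-ed entry lines.
import Mathlib
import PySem

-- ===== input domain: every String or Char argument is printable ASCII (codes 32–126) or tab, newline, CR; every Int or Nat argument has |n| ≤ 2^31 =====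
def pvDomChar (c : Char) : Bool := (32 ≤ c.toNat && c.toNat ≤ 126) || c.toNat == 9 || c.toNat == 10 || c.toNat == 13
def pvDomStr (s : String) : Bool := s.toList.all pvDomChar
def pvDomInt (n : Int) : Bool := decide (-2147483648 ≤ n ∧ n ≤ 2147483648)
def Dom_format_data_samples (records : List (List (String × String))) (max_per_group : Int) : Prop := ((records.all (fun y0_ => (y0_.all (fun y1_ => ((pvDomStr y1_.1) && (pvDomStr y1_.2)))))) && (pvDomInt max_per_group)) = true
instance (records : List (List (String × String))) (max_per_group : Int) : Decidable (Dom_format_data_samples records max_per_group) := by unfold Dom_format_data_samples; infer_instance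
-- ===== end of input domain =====

-- B drops A's defaultdict grouping index and its lines list entirely: it filters the records
-- per (country, product) combo while walking the flattened combo order and grows the report
-- string by direct concatenation (objective: alternative decomposition, same output).

-- shared module constants
def COUNTRY_ORDER : List String :=
  ["US", "CA", "UK", "DE", "FR", "ES", "IT", "BR",
   "MX", "CL", "TH", "AU", "TW", "SG", "EG", "SA"]

def COUNTRY_FLAG : List (String × String) :=
  [("US", "🇺🇸"), ("CA", "🇨🇦"), ("UK", "🇬🇧"), ("DE", "🇩🇪"),
   ("FR", "🇫🇷"), ("ES", "🇪🇸"), ("IT", "🇮🇹"), ("BR", "🇧🇷"),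
   ("MX", "🇲🇽"), ("CL", "🇨🇱"), ("TH", "🇹🇭"), ("AU", "🇦🇺"),
   ("TW", "🇹🇼"), ("SG", "🇸🇬"), ("EG", "🇪🇬"), ("SA", "🇸🇦")]

def PRODUCT_ORDER : List String := ["TV", "Refrigerator", "Washing Machine", "Monitor", "LG gram"]

-- ===== PORT A =====
-- r.get(k, d) on a Python dict rendered as an association list: first matching key, else default
def pvGet (r : List (String × String)) (k d : String) : String :=
  ((r.find? (fun p => p.1 == k)).map Prod.snd).getD d

-- the group header f-string:  f"\n### {flag} {country} - {product} ({n}건)"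
def pvHeader (country product : String) (n : Int) : String :=
  "\n### " ++ pvGet COUNTRY_FLAG country "" ++ " " ++ country ++ " - " ++ product
    ++ " (" ++ PySem.Int.toStr n ++ "건)"

-- the per-record f-string (value[:200]; the link suffix only when url is truthy)
def pvEntry (r : List (String × String)) : String :=
  let url := pvGet r "source_url" ""
  "- [" ++ pvGet r "brand" "?" ++ "] (" ++ pvGet r "signal_type" "?" ++ ", "
    ++ pvGet r "confidence" "?" ++ ") " ++ PySem.Str.slice (pvGet r "value" "") none (some 200)
    ++ (if url == "" then "" else " [🔗](" ++ url ++ ")")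

def pvTitle : List String := ["## 국가/제품별 주요 데이터 샘플\n"]

def format_data_samples (records : List (List (String × String))) (max_per_group : Int) : String :=
  let groups : PySem.Dict (String × String) (List (List (String × String))) :=
    records.foldl
      (fun d r => d.modify (pvGet r "country" "?", pvGet r "product" "?") [] (· ++ [r]))
      PySem.Dict.empty
  let lines := COUNTRY_ORDER.foldl (fun lines country =>
    PRODUCT_ORDER.foldl (fun lines product =>
      let group := groups.getD (country, product) []
      if group = [] then lines
      else
        (PySem.List.slice group none (some max_per_group)).foldl
          (fun lines r => lines ++ [pvEntry r])
          (lines ++ [pvHeader country product group.length])) lines) pvTitle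
  PySem.Str.join "\n" lines

-- ===== PORT B =====
-- B's record lookup, written as its own match (same Python .get semantics)
def bGet (r : List (String × String)) (k dflt : String) : String :=
  match r.find? (fun kv => kv.1 == k) with
  | some kv => kv.2
  | none => dflt

-- B's per-record line, newline included (Python helper _line)
def bLine (r : List (String × String)) : String :=
  let url := bGet r "source_url" ""
  "\n- [" ++ bGet r "brand" "?" ++ "] (" ++ bGet r "signal_type" "?" ++ ", "
    ++ bGet r "confidence" "?" ++ ") " ++ PySem.Str.slice (bGet r "value" "") none (some 200)
    ++ (if url == "" then "" else " [🔗](" ++ url ++ ")")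

def format_data_samples_alt (records : List (List (String × String))) (max_per_group : Int) : String :=
  (COUNTRY_ORDER.flatMap (fun c => PRODUCT_ORDER.map (fun p => (c, p)))).foldl
    (fun out cp =>
      let ms := records.filter
        (fun r => bGet r "country" "?" == cp.1 && bGet r "product" "?" == cp.2)
      if ms.isEmpty then out
      else
        (out ++ ("\n\n### " ++ bGet COUNTRY_FLAG cp.1 "" ++ " " ++ cp.1 ++ " - " ++ cp.2
                  ++ " (" ++ PySem.Int.toStr (ms.length : Int) ++ "건)"))
          ++ PySem.Str.join "" ((PySem.List.slice ms none (some max_per_group)).map bLine))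
    "## 국가/제품별 주요 데이터 샘플\n"

-- ===== PRECONDITION & SPEC =====
def Spec_format_data_samples (records : List (List (String × String))) (max_per_group : Int) (out : String) : Prop := out = format_data_samples_alt records max_per_group
instance (records : List (List (String × String))) (max_per_group : Int) (out : String) : Decidable (Spec_format_data_samples records max_per_group out) := by unfold Spec_format_data_samples; infer_instance

-- ===== CLAIM (what is proved, stated in full; the proofs are below) =====
def Claim_equal_format_data_samples : Prop := ∀ (records : List (List (String × String))) (max_per_group : Int), Dom_format_data_samples records max_per_group → Spec_format_data_samples records max_per_group (format_data_samples records max_per_group)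

-- ===== LEMMAS AND PROOFS =====

-- the two record lookups agree
lemma bGet_eq_pvGet (r : List (String × String)) (k d : String) : bGet r k d = pvGet r k d := by
  unfold bGet pvGet
  cases r.find? (fun kv => kv.1 == k) <;> simp

lemma bLine_eq (r : List (String × String)) : bLine r = "\n" ++ pvEntry r := by
  simp only [bLine, pvEntry, bGet_eq_pvGet, String.append_assoc]
  conv_rhs => rw [← String.append_assoc]
  rfl

-- char-level intercalate as a flatMap
lemma interc (s : List Char) (x : List Char) (xs : List (List Char)) :
    s.intercalate (x :: xs) = x ++ xs.flatMap (fun y => s ++ y) := by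
  simp [List.intercalate]
  induction xs generalizing x <;> simp_all [List.intersperse]

-- ''.join at the char level
lemma join_empty (M : List String) :
    PySem.Str.join "" M = String.ofList (M.map String.toList).flatten := by
  cases M with
  | nil => simp [PySem.Str.join, PySem.Chars.join, List.intercalate]
  | cons x xs =>
    simp [PySem.Str.join, PySem.Chars.join, interc]

lemma join_empty_cons (x : String) (M : List String) :
    PySem.Str.join "" (x :: M) = x ++ PySem.Str.join "" M := by
  simp only [join_empty, List.map_cons, List.flatten_cons, String.ofList_append,
    String.ofList_toList]

lemma join_empty_append (M N : List String) :
    PySem.Str.join "" (M ++ N) = PySem.Str.join "" M ++ PySem.Str.join "" N := by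
  induction M with
  | nil => simp [PySem.Str.join, PySem.Chars.join, List.intercalate]
  | cons x xs ih => simp only [List.cons_append, join_empty_cons, ih, String.append_assoc]

-- '\n'.join of a nonempty list, as a direct concatenation
lemma join_cons (t : String) (L : List String) :
    PySem.Str.join "\n" (t :: L) = t ++ PySem.Str.join "" (L.map (fun s => "\n" ++ s)) := by
  cases L with
  | nil => simp [PySem.Str.join, PySem.Chars.join, List.intercalate]
  | cons x xs =>
    simp only [PySem.Str.join, PySem.Chars.join, List.map_cons, interc, List.map_map]
    rw [String.ofList_append, String.ofList_toList]
    congr 1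
    congr 1
    simp [Function.comp_def, String.toList_append]
    simp [List.flatMap_def, List.map_map, Function.comp_def]

-- a foldl whose step appends a block is a flatMap (list accumulator)
lemma foldl_seg {α β : Type} (l : List α) (step : List β → α → List β) (f : α → List β)
    (h : ∀ acc x, step acc x = acc ++ f x) (acc : List β) :
    l.foldl step acc = acc ++ l.flatMap f := by
  induction l generalizing acc with
  | nil => simp
  | cons x xs ih => simp [h, ih, List.flatMap_cons]

-- a foldl whose step appends a block is a join (string accumulator)
lemma foldl_str {α : Type} (l : List α) (step : String → α → String) (g : α → String)
    (h : ∀ acc x, step acc x = acc ++ g x) (acc : String) :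
    l.foldl step acc = acc ++ PySem.Str.join "" (l.map g) := by
  induction l generalizing acc with
  | nil => simp [PySem.Str.join, PySem.Chars.join, List.intercalate]
  | cons x xs ih => simp [h, ih, join_empty_cons, String.append_assoc]

lemma join_flatMap {α : Type} (l : List α) (f : α → List String) :
    PySem.Str.join "" ((l.flatMap f).map (fun s => "\n" ++ s))
      = PySem.Str.join "" (l.map (fun x => PySem.Str.join "" ((f x).map (fun s => "\n" ++ s)))) := by
  induction l with
  | nil => rfl
  | cons x xs ih =>
    simp only [List.flatMap_cons, List.map_cons, List.map_append, join_empty_append,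
      join_empty_cons, ih]

-- A's defaultdict index, looked up at any key, is exactly a filtering scan
lemma groups_getD (records : List (List (String × String))) (key : String × String) :
    (records.foldl
      (fun d r => d.modify (pvGet r "country" "?", pvGet r "product" "?") [] (· ++ [r]))
      PySem.Dict.empty).getD key []
    = records.filter
        (fun r => pvGet r "country" "?" == key.1 && pvGet r "product" "?" == key.2) := by
  have h1 : records.foldl
      (fun d r => d.modify (pvGet r "country" "?", pvGet r "product" "?") [] (· ++ [r]))
      PySem.Dict.empty
      = (records.map (fun r => ((pvGet r "country" "?", pvGet r "product" "?"), r))).foldl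
          (fun d p => d.modify p.1 [] (· ++ [p.2])) PySem.Dict.empty :=
    (List.foldl_map (f := fun r => ((pvGet r "country" "?", pvGet r "product" "?"), r))
      (g := fun d p => PySem.Dict.modify d p.1 [] (· ++ [p.2]))).symm
  rw [h1, PySem.Dict.getD_foldl_modify_append]
  obtain ⟨k1, k2⟩ := key
  simp only [List.filter_map, Function.comp_def, PySem.Dict.getD_empty, List.map_map, List.nil_append]
  rw [show (fun x : List (String × String) => ((fun r => ((pvGet r "country" "?", pvGet r "product" "?"), r)) x).1 == (k1, k2)) = (fun r => pvGet r "country" "?" == k1 && pvGet r "product" "?" == k2) from rfl]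
  simp

-- splitting the flattened combo list back into the two nested loops
lemma combo_split {A B : Type} (C : List A) (P : List B) (f : A × B → List String) :
    C.flatMap (fun c => P.flatMap (fun p => f (c, p)))
      = (C.flatMap (fun c => P.map (fun p => (c, p)))).flatMap f := by
  induction C with
  | nil => rfl
  | cons c cs ih => simp only [List.flatMap_cons, List.flatMap_append, ih, List.flatMap_map]

-- A's per-combo block of lines
def segA (records : List (List (String × String))) (m : Int) (cp : String × String) : List String :=
  let g := records.filter (fun r => pvGet r "country" "?" == cp.1 && pvGet r "product" "?" == cp.2)
  if g = [] then []
  else pvHeader cp.1 cp.2 g.length :: (PySem.List.slice g none (some m)).map pvEntry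

-- A's lines list is the title followed by the combo blocks in order
lemma A_lines (records : List (List (String × String))) (m : Int) :
    format_data_samples records m
      = PySem.Str.join "\n" (pvTitle ++
          (COUNTRY_ORDER.flatMap (fun c => PRODUCT_ORDER.map (fun p => (c, p)))).flatMap
            (segA records m)) := by
  simp only [format_data_samples]
  congr 1
  rw [foldl_seg COUNTRY_ORDER _
      (fun c => PRODUCT_ORDER.flatMap (fun p => segA records m (c, p)))
      (fun acc c =>
        foldl_seg PRODUCT_ORDER _ (fun p => segA records m (c, p))
          (fun acc p => by
            simp only [segA, groups_getD]
            split_ifs with h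
            · simp
            · rw [PySem.List.foldl_append_singleton_eq_map]
              simp) acc)]
  rw [combo_split]

-- each combo block, newline-prefixed and concatenated, is B's contribution for that combo
lemma seg_eq (records : List (List (String × String))) (m : Int) (cp : String × String) :
    PySem.Str.join "" ((segA records m cp).map (fun s => "\n" ++ s))
      = (let ms := records.filter
            (fun r => bGet r "country" "?" == cp.1 && bGet r "product" "?" == cp.2)
         if ms.isEmpty then ""
         else ("\n\n### " ++ bGet COUNTRY_FLAG cp.1 "" ++ " " ++ cp.1 ++ " - " ++ cp.2
                ++ " (" ++ PySem.Int.toStr (ms.length : Int) ++ "건)")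
              ++ PySem.Str.join "" ((PySem.List.slice ms none (some m)).map bLine)) := by
  simp only [bGet_eq_pvGet, segA, List.isEmpty_iff]
  split_ifs with h
  · simp [PySem.Str.join, PySem.Chars.join, List.intercalate]
  · rw [List.map_cons, join_empty_cons, List.map_map,
      show ((fun s => ("\n" ++ s : String)) ∘ pvEntry) = bLine from funext fun r => (bLine_eq r).symm]
    congr 1

-- ===== VERDICT (by name: the statement is the Claim_ definition above) =====
theorem format_data_samples_spec : Claim_equal_format_data_samples := by
  intro records m _
  unfold Spec_format_data_samples
  rw [A_lines]
  simp only [pvTitle, List.cons_append, List.nil_append]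
  rw [join_cons, join_flatMap]
  unfold format_data_samples_alt
  rw [foldl_str _ _
      (fun cp =>
        let ms := records.filter
          (fun r => bGet r "country" "?" == cp.1 && bGet r "product" "?" == cp.2)
        if ms.isEmpty then ""
        else ("\n\n### " ++ bGet COUNTRY_FLAG cp.1 "" ++ " " ++ cp.1 ++ " - " ++ cp.2
               ++ " (" ++ PySem.Int.toStr (ms.length : Int) ++ "건)")
             ++ PySem.Str.join "" ((PySem.List.slice ms none (some m)).map bLine))
      (fun acc cp => by
        simp only
        split_ifs with h
        · simp
        · rw [String.append_assoc])]
  congr 2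
  exact List.map_congr_left (fun cp _ => seg_eq records m cp)
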